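-- pv_equiv track=rewrite | github.com/BenjaminIrwin/stable-diffusion-backend | large_image_gen.py | get_crop_region
-- ===== SOURCE A (Python) =====
-- def get_crop_region(x1, y1, x2, y2, mask_w, mask_h, pad=0, target_res=512):
--
--     crop_left = x1 - pad
--     crop_top = y1 - pad
--     crop_right = x2 + pad
--     crop_bottom = y2 + pad
--
--     while crop_right - crop_left < target_res:
--         crop_right += 1
--         crop_left -= 1
--
--     while crop_bottom - crop_top < target_res:
--         crop_bottom += 1
--         crop_top -= 1
--
--     while crop_right - crop_left > target_res:
--         if (crop_right - crop_left) - target_res == 1: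
--             crop_left += 1
--         else:
--             crop_right -= 1
--             crop_left += 1
--
--     while crop_bottom - crop_top > target_res:
--         if (crop_bottom - crop_top) - target_res == 1:
--             crop_top += 1
--         else:
--             crop_bottom -= 1
--             crop_top += 1
--
--     if crop_left < 0:
--         crop_right = target_res
--         crop_left = 0
--
--     if crop_top < 0:
--         crop_bottom = target_res
--         crop_top = 0
--
--     if crop_right > mask_w:
--         crop_right = mask_w
--         crop_left = mask_w - target_res
--
--     if crop_bottom > mask_h:
--         crop_bottom = mask_h
--         crop_top = mask_h - target_res
--
--     return (int((crop_left)), int((crop_top)), int((crop_right)), int((crop_bottom)))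
-- ===== SOURCE B (Python) =====
-- def get_crop_region(x1, y1, x2, y2, mask_w, mask_h, pad=0, target_res=512):
--     # Closed-form centered resize: shift each axis span to exactly target_res
--     # in O(1), matching the loops' parity tie-break, then clamp to the mask.
--     d = target_res - (x2 - x1 + 2 * pad)
--     crop_left = x1 - pad - d // 2
--     crop_right = crop_left + target_res
--
--     d = target_res - (y2 - y1 + 2 * pad)
--     crop_top = y1 - pad - d // 2
--     crop_bottom = crop_top + target_res
--
--     if crop_left < 0:
--         crop_left, crop_right = 0, target_res
--     if crop_top < 0:
--         crop_top, crop_bottom = 0, target_res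
--     if crop_right > mask_w:
--         crop_left, crop_right = mask_w - target_res, mask_w
--     if crop_bottom > mask_h:
--         crop_top, crop_bottom = mask_h - target_res, mask_h
--     return (crop_left, crop_top, crop_right, crop_bottom)
-- ===== Notes on version B (the rewrite author's own statement) =====
-- stated objective: faster
-- what changed: Replaced the four step-by-step grow/shrink while-loops by O(1) closed-form centered arithmetic (left -= d//2, right = left + target_res), preserving the loops' parity tie-break, then the same clamps.
import Mathlib
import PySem

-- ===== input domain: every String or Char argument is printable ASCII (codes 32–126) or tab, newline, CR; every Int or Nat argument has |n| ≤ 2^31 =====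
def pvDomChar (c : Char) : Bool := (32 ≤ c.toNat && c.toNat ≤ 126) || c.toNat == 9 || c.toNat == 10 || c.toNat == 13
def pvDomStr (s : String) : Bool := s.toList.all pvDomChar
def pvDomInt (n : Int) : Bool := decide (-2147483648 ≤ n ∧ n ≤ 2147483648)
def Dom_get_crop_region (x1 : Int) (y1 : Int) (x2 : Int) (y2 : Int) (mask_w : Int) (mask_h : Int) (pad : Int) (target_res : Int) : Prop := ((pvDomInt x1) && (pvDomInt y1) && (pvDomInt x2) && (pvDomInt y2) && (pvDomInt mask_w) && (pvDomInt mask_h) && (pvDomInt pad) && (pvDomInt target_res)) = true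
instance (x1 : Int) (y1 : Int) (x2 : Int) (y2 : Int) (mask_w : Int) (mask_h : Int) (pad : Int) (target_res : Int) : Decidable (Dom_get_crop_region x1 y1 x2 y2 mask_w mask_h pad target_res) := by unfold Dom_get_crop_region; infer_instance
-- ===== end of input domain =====

-- B replaces A's four step-by-step grow/shrink while-loops by O(1) closed-form
-- centered arithmetic (same parity tie-break), then the same clamps (objective: faster).

-- ===== PORT A =====
-- A's first kind of while-loop: grow the span by 1 on each side until ≥ target
def pvGrow (t L R : Int) : Int × Int :=
  if R - L < t then pvGrow t (L - 1) (R + 1) else (L, R)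
termination_by (t - (R - L)).toNat
decreasing_by omega

-- A's second kind of while-loop: shrink the span to target, left-biased when 1 over
def pvShrink (t L R : Int) : Int × Int :=
  if R - L > t then
    if (R - L) - t = 1 then pvShrink t (L + 1) R
    else pvShrink t (L + 1) (R - 1)
  else (L, R)
termination_by ((R - L) - t).toNat
decreasing_by all_goals omega

def get_crop_region (x1 : Int) (y1 : Int) (x2 : Int) (y2 : Int) (mask_w : Int) (mask_h : Int) (pad : Int) (target_res : Int) : List Int :=
  let cl0 := x1 - pad
  let ct0 := y1 - pad
  let cr0 := x2 + pad
  let cb0 := y2 + pad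
  let pg := pvGrow target_res cl0 cr0
  let qg := pvGrow target_res ct0 cb0
  let ps := pvShrink target_res pg.1 pg.2
  let qs := pvShrink target_res qg.1 qg.2
  let cl1 := ps.1; let cr1 := ps.2
  let ct1 := qs.1; let cb1 := qs.2
  let cr2 := if cl1 < 0 then target_res else cr1
  let cl2 := if cl1 < 0 then 0 else cl1
  let cb2 := if ct1 < 0 then target_res else cb1
  let ct2 := if ct1 < 0 then 0 else ct1
  let cr3 := if cr2 > mask_w then mask_w else cr2
  let cl3 := if cr2 > mask_w then mask_w - target_res else cl2
  let cb3 := if cb2 > mask_h then mask_h else cb2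
  let ct3 := if cb2 > mask_h then mask_h - target_res else ct2
  [cl3, ct3, cr3, cb3]

-- ===== PORT B =====
def get_crop_region_alt (x1 : Int) (y1 : Int) (x2 : Int) (y2 : Int) (mask_w : Int) (mask_h : Int) (pad : Int) (target_res : Int) : List Int :=
  let dx := target_res - (x2 - x1 + 2 * pad)
  let cl0 := x1 - pad - PySem.Int.floordiv dx 2
  let cr0 := cl0 + target_res
  let dy := target_res - (y2 - y1 + 2 * pad)
  let ct0 := y1 - pad - PySem.Int.floordiv dy 2
  let cb0 := ct0 + target_res
  let cl1 := if cl0 < 0 then 0 else cl0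
  let cr1 := if cl0 < 0 then target_res else cr0
  let ct1 := if ct0 < 0 then 0 else ct0
  let cb1 := if ct0 < 0 then target_res else cb0
  let cl2 := if cr1 > mask_w then mask_w - target_res else cl1
  let cr2 := if cr1 > mask_w then mask_w else cr1
  let ct2 := if cb1 > mask_h then mask_h - target_res else ct1
  let cb2 := if cb1 > mask_h then mask_h else cb1
  [cl2, ct2, cr2, cb2]

-- ===== PRECONDITION & SPEC =====
def Spec_get_crop_region (x1 : Int) (y1 : Int) (x2 : Int) (y2 : Int) (mask_w : Int) (mask_h : Int) (pad : Int) (target_res : Int) (out : List Int) : Prop := out = get_crop_region_alt x1 y1 x2 y2 mask_w mask_h pad target_res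
instance (x1 : Int) (y1 : Int) (x2 : Int) (y2 : Int) (mask_w : Int) (mask_h : Int) (pad : Int) (target_res : Int) (out : List Int) : Decidable (Spec_get_crop_region x1 y1 x2 y2 mask_w mask_h pad target_res out) := by unfold Spec_get_crop_region; infer_instance

-- ===== CLAIM (what is proved, stated in full; the proofs are below) =====
def Claim_equal_get_crop_region : Prop := ∀ (x1 : Int) (y1 : Int) (x2 : Int) (y2 : Int) (mask_w : Int) (mask_h : Int) (pad : Int) (target_res : Int), Dom_get_crop_region x1 y1 x2 y2 mask_w mask_h pad target_res → Spec_get_crop_region x1 y1 x2 y2 mask_w mask_h pad target_res (get_crop_region x1 y1 x2 y2 mask_w mask_h pad target_res)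

-- ===== LEMMAS AND PROOFS =====

-- closed form of the grow loop
theorem pvGrow_eq (t L R : Int) :
    pvGrow t L R = (L - max 0 ((t - (R - L) + 1) / 2), R + max 0 ((t - (R - L) + 1) / 2)) := by
  fun_induction pvGrow t L R with
  | case1 L R h ih =>
    rw [ih]
    simp only [Prod.mk.injEq]; omega
  | case2 L R h =>
    simp only [Prod.mk.injEq]; omega

-- closed form of the shrink loop
theorem pvShrink_eq (t L R : Int) :
    pvShrink t L R = (L + max 0 ((R - L - t + 1) / 2), R - max 0 ((R - L - t) / 2)) := by
  fun_induction pvShrink t L R with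
  | case1 L R h h1 ih =>
    rw [ih]; simp only [Prod.mk.injEq]; omega
  | case2 L R h h1 ih =>
    rw [ih]; simp only [Prod.mk.injEq]; omega
  | case3 L R h =>
    simp only [Prod.mk.injEq]; omega

-- composed loops = B's closed form on one axis
theorem core_eq (t L R : Int) :
    pvShrink t (pvGrow t L R).1 (pvGrow t L R).2
      = (L - PySem.Int.floordiv (t - (R - L)) 2,
         L - PySem.Int.floordiv (t - (R - L)) 2 + t) := by
  rw [pvGrow_eq, pvShrink_eq, PySem.Int.floordiv_eq_ediv_of_pos (by omega : (0:Int) < 2)]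
  simp only [Prod.mk.injEq]; omega

-- ===== VERDICT (by name: the statement is the Claim_ definition above) =====
theorem get_crop_region_spec : Claim_equal_get_crop_region := by
  intro x1 y1 x2 y2 mask_w mask_h pad target_res _
  show _ = _
  have hx : x2 + pad - (x1 - pad) = x2 - x1 + 2 * pad := by ring
  have hy : y2 + pad - (y1 - pad) = y2 - y1 + 2 * pad := by ring
  simp only [get_crop_region, get_crop_region_alt, core_eq, hx, hy]
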